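-- pv_equiv track=rewrite | github.com/jiadonglee/jorg | src/jorg/lines/core.py | is_molecular_species_id
-- ===== SOURCE A (Python) =====
-- def is_molecular_species_id(species_id: int) -> bool:
--     """
--     Check if species ID corresponds to a molecule.
--
--     Uses convention: molecules have species_id > 100 and specific patterns.
--
--     Parameters
--     ----------
--     species_id : int
--         Species identifier
--
--     Returns
--     -------
--     bool
--         True if molecular species
--     """
--     # Common molecular species ID ranges
--     molecular_ranges = [
--         (101, 199),   # Diatomic molecules (H2, etc.)
--         (601, 699),   # Carbon compounds (CH, CN, CO, etc.)
--         (701, 799),   # Nitrogen compounds (NH, etc.)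
--         (801, 899),   # Oxygen compounds (OH, H2O, etc.)
--         (1201, 1299), # Mg compounds (MgH, etc.)
--         (1301, 1399), # Al compounds (AlH, etc.)
--         (1401, 1499), # Si compounds (SiH, SiO, etc.)
--         (2001, 2099), # Ca compounds (CaH, etc.)
--         (2201, 2299), # Ti compounds (TiO, etc.)
--         (2301, 2399), # V compounds (VO, etc.)
--         (2601, 2699), # Fe compounds (FeH, etc.)
--     ]
--
--     # Check if species_id falls in molecular ranges
--     for min_id, max_id in molecular_ranges:
--         if min_id <= species_id <= max_id:
--             return True
--
--     return False
-- ===== SOURCE B (Python) =====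
-- def is_molecular_species_id(species_id: int) -> bool:
--     # Every molecular range is (h*100+1, h*100+99): decide by digit decomposition.
--     return species_id // 100 in {1, 6, 7, 8, 12, 13, 14, 20, 22, 23, 26} \
--         and 1 <= species_id % 100 <= 99
-- ===== Notes on version B (the rewrite author's own statement) =====
-- stated objective: simpler
-- what changed: Replaces the scan over the eleven (min,max) range pairs by a closed-form arithmetic test: the hundreds digit must lie in a fixed set and the two-digit remainder must be nonzero.
import Mathlib
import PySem

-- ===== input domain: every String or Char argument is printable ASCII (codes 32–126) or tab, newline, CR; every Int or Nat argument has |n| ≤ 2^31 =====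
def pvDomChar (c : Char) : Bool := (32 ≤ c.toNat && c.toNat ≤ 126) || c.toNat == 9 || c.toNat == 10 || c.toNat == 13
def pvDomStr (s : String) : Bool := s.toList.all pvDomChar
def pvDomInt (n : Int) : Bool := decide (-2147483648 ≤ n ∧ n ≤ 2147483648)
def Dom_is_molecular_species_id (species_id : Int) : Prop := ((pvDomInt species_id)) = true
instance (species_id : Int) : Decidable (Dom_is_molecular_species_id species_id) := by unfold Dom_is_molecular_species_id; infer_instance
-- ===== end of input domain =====

-- B replaces A's scan over 11 range pairs by a closed-form //100 and %100 arithmetic test (simpler).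

-- ===== PORT A =====
-- the loop `for min_id, max_id in molecular_ranges: if min_id <= species_id <= max_id: return True`
def pvScanRanges (ranges : List (Int × Int)) (species_id : Int) : Bool :=
  match ranges with
  | [] => false
  | (min_id, max_id) :: rest =>
    if min_id ≤ species_id ∧ species_id ≤ max_id then true
    else pvScanRanges rest species_id

def is_molecular_species_id (species_id : Int) : Bool :=
  pvScanRanges [(101, 199), (601, 699), (701, 799), (801, 899), (1201, 1299),
    (1301, 1399), (1401, 1499), (2001, 2099), (2201, 2299), (2301, 2399), (2601, 2699)]
    species_id

-- ===== PORT B =====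
def is_molecular_species_id_alt (species_id : Int) : Bool :=
  ([1, 6, 7, 8, 12, 13, 14, 20, 22, 23, 26] : List Int).contains (PySem.Int.floordiv species_id 100)
    && (1 ≤ PySem.Int.mod species_id 100 && PySem.Int.mod species_id 100 ≤ 99)

-- ===== PRECONDITION & SPEC =====
def Spec_is_molecular_species_id (species_id : Int) (out : Bool) : Prop := out = is_molecular_species_id_alt species_id
instance (species_id : Int) (out : Bool) : Decidable (Spec_is_molecular_species_id species_id out) := by unfold Spec_is_molecular_species_id; infer_instance

-- ===== CLAIM (what is proved, stated in full; the proofs are below) =====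
def Claim_equal_is_molecular_species_id : Prop := ∀ (species_id : Int), Dom_is_molecular_species_id species_id → Spec_is_molecular_species_id species_id (is_molecular_species_id species_id)

-- ===== LEMMAS AND PROOFS =====

-- ===== VERDICT (by name: the statement is the Claim_ definition above) =====
theorem pvScanRanges_nil (n : Int) : pvScanRanges [] n = false := rfl

theorem pvScanRanges_cons (lo hi : Int) (rest : List (Int × Int)) (n : Int) :
    pvScanRanges ((lo, hi) :: rest) n =
      if lo ≤ n ∧ n ≤ hi then true else pvScanRanges rest n := rfl

set_option maxHeartbeats 1000000 in
theorem is_molecular_species_id_spec : Claim_equal_is_molecular_species_id := by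
  intro n _
  unfold Spec_is_molecular_species_id is_molecular_species_id is_molecular_species_id_alt
  simp only [pvScanRanges_cons, pvScanRanges_nil]
  rw [PySem.Int.floordiv_eq_ediv_of_pos (by norm_num), PySem.Int.mod_eq_emod_of_pos (by norm_num)]
  simp only [List.contains_cons, List.contains_nil, Bool.or_false]
  rw [Bool.eq_iff_iff]
  simp only [Bool.and_eq_true, Bool.or_eq_true, beq_iff_eq, decide_eq_true_eq]
  split_ifs <;> (try simp) <;> omega
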